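-- pv_equiv track=rewrite | github.com/wenyl22/single-turn-rl-warmup | snake_ds_generation.py | check_valid_move
-- ===== SOURCE A (Python) =====
-- import queue
-- from copy import deepcopy
--
-- dxy_mapping = {1 : (-1, 0), 2: (1, 0), 3: (0, -1), 4: (0, 1)} # LRDU
--
-- def check_valid_move(state_for_llm, action):
--     head_x, head_y = state_for_llm['snake'][0]
--     dx, dy = dxy_mapping[action]
--     new_head = (head_x + dx, head_y + dy)
--     if new_head in state_for_llm['snake'] or not (0 < new_head[0] < 7 and 0 < new_head[1] < 7):
--         return False, 0
--     new_state_for_llm = {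
--         'snake': [new_head] + deepcopy(state_for_llm['snake'][:-1])
--     }
--     # validity in X steps
--     q = queue.Queue()
--     q.put((new_state_for_llm, 0))  # (state, steps)
--     while not q.empty():
--         current_state, steps = q.get()
--         for next_action in range(1, 5):  # Actions: 1 (L), 2 (R), 3 (D), 4 (U)
--             next_dx, next_dy = dxy_mapping[next_action]
--             next_head = (current_state['snake'][0][0] + next_dx, current_state['snake'][0][1] + next_dy)
--             if next_head in current_state['snake'] or not (0 < next_head[0] < 7 and 0 < next_head[1] < 7):
--                 continue
--             new_snake = [next_head] + deepcopy(current_state['snake'][:-1])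
--             new_state = {
--                 'snake': new_snake,
--             }
--             if steps + 1 >= 5:  # If it takes more than 5 steps, it's invalid
--                 return True, 0
--             q.put((new_state, steps + 1))
--     return False, steps + 1
-- ===== SOURCE B (Python) =====
-- dxy_mapping = {1: (-1, 0), 2: (1, 0), 3: (0, -1), 4: (0, 1)}  # LRDU
--
-- def _longest(snake, budget):
--     # longest run of consecutive valid moves from this configuration, capped at budget
--     if budget == 0:
--         return 0
--     best = 0
--     for a in (1, 2, 3, 4):
--         dx, dy = dxy_mapping[a]
--         h = (snake[0][0] + dx, snake[0][1] + dy)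
--         if h in snake or not (0 < h[0] < 7 and 0 < h[1] < 7):
--             continue
--         best = max(best, 1 + _longest([h] + snake[:-1], budget - 1))
--     return best
--
-- def check_valid_move(state_for_llm, action):
--     snake = state_for_llm['snake']
--     head_x, head_y = snake[0]
--     dx, dy = dxy_mapping[action]
--     new_head = (head_x + dx, head_y + dy)
--     if new_head in snake or not (0 < new_head[0] < 7 and 0 < new_head[1] < 7):
--         return False, 0
--     L = _longest([new_head] + snake[:-1], 5)
--     return (True, 0) if L >= 5 else (False, L + 1)
-- ===== Notes on version B (the rewrite author's own statement) =====
-- stated objective: alternative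
-- what changed: A's FIFO-queue breadth-first search over snake states (whose last-popped depth yields the failure return value) is replaced by a depth-first recursion that directly computes the longest number of consecutive valid moves achievable (capped at 5); B returns (True,0) if that length reaches 5 and (False, length+1) otherwise.
import Mathlib
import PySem

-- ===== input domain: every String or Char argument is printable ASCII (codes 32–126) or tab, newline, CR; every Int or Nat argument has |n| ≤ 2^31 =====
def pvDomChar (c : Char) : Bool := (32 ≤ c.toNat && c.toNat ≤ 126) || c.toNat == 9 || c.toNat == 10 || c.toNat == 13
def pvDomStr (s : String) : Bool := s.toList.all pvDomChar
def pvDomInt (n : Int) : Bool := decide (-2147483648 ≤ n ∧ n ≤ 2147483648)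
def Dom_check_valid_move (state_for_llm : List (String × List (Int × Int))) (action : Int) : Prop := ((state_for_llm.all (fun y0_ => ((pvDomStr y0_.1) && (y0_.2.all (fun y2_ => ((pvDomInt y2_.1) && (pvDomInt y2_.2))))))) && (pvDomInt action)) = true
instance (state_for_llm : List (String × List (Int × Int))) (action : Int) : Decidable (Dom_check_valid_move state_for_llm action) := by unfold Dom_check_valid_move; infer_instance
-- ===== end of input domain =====

-- B replaces A's FIFO-queue BFS by a depth-first recursion that computes the longest run of
-- consecutive valid moves (capped at 5) after the tried move; same return value, no queue.

-- module constant dxy_mapping = {1:(-1,0), 2:(1,0), 3:(0,-1), 4:(0,1)} (shared by both Pythons)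
def dxy_mapping (a : Int) : Int × Int :=
  if a = 1 then (-1, 0) else if a = 2 then (1, 0) else if a = 3 then (0, -1) else (0, 1)

-- ===== PORT A =====
-- inner `for next_action in range(1,5)` loop of one BFS pop: `none` = the `return True, 0` path,
-- `some kids` = the list of states q.put in action order.  current_state['snake'][0] is `headI`:
-- every queued snake is built as [next_head]+…, hence non-empty (top-level emptiness is Pre_'s).
def tryActsA (c : List (Int × Int)) (steps : Nat) : List Int → Option (List (List (Int × Int) × Nat))
  | [] => some []
  | a :: as =>
    let d := dxy_mapping a
    let nh := (c.headI.1 + d.1, c.headI.2 + d.2)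
    if c.contains nh || !(decide (0 < nh.1 ∧ nh.1 < 7 ∧ 0 < nh.2 ∧ nh.2 < 7)) then
      tryActsA c steps as
    else if 5 ≤ steps + 1 then none
    else (tryActsA c steps as).map
      (fun rest => (nh :: PySem.List.slice c none (some (-1)), steps + 1) :: rest)

def wQ (q : List (List (Int × Int) × Nat)) : Nat := (q.map (fun p => 5 ^ (5 - p.2))).sum

-- termination measure bound for bfsA (cited by its decreasing_by)
theorem tryActsA_wq (c : List (Int × Int)) (s : Nat) :
    ∀ (acts : List Int) (kids : List (List (Int × Int) × Nat)),
      tryActsA c s acts = some kids → wQ kids ≤ acts.length * 5 ^ (4 - s) ∧ (kids ≠ [] → s ≤ 3) := by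
  intro acts
  induction acts with
  | nil => intro kids h; simp [tryActsA] at h; subst h; simp [wQ]
  | cons a as ih =>
    intro kids h
    simp only [tryActsA] at h
    split at h
    · obtain ⟨h1, h2⟩ := ih kids h
      constructor
      · calc wQ kids ≤ as.length * 5 ^ (4 - s) := h1
          _ ≤ (a :: as).length * 5 ^ (4 - s) := by
              simp only [List.length_cons]; exact Nat.mul_le_mul_right _ (Nat.le_succ _)
      · exact h2
    · split at h
      · simp at h
      · rename_i hge
        match hrec : tryActsA c s as with
        | none => rw [hrec] at h; simp at h
        | some rest =>
          rw [hrec] at h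
          simp only [Option.map_some, Option.some.injEq] at h
          obtain ⟨h1, _⟩ := ih rest hrec
          constructor
          · subst h
            simp only [wQ, List.map_cons, List.sum_cons, List.length_cons] at *
            have h54 : 5 - (s + 1) = 4 - s := by omega
            rw [h54]
            have h1' : (rest.map (fun p => 5 ^ (5 - p.2))).sum ≤ as.length * 5 ^ (4 - s) := h1
            calc 5 ^ (4 - s) + (rest.map (fun p => 5 ^ (5 - p.2))).sum
                ≤ 5 ^ (4 - s) + as.length * 5 ^ (4 - s) := Nat.add_le_add_left h1' _
              _ = (as.length + 1) * 5 ^ (4 - s) := by ring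
          · intro _; omega

def bfsA (q : List (List (Int × Int) × Nat)) (last : Nat) : Bool × Int :=
  match q with
  | [] => (false, (last : Int) + 1)
  | (c, s) :: rest =>
    match h : tryActsA c s [1, 2, 3, 4] with
    | none => (true, 0)
    | some kids => bfsA (rest ++ kids) s
termination_by wQ q
decreasing_by
  obtain ⟨h1, h2⟩ := tryActsA_wq c s [1, 2, 3, 4] kids h
  simp only [wQ, List.map_append, List.sum_append, List.map_cons, List.sum_cons]
  have hlt : (kids.map (fun p => 5 ^ (5 - p.2))).sum < 5 ^ (5 - s) := by
    rcases eq_or_ne kids [] with rfl | hne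
    · simp only [List.map_nil, List.sum_nil]; exact Nat.pow_pos (show 0 < 5 by omega)
    · have hs3 := h2 hne
      have h54 : 5 - s = (4 - s) + 1 := by omega
      have hx : 0 < 5 ^ (4 - s) := Nat.pow_pos (show 0 < 5 by omega)
      have : wQ kids ≤ 4 * 5 ^ (4 - s) := by
        have hl : ([1, 2, 3, 4] : List Int).length = 4 := rfl
        rw [hl] at h1; exact h1
      calc (kids.map (fun p => 5 ^ (5 - p.2))).sum ≤ 4 * 5 ^ (4 - s) := this
        _ < 5 ^ ((4 - s) + 1) := by rw [pow_succ]; omega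
        _ = 5 ^ (5 - s) := by rw [h54]
  omega

def check_valid_move (state_for_llm : List (String × List (Int × Int))) (action : Int) : Bool × Int :=
  let snake := ((PySem.Dict.mk state_for_llm).get? "snake").getD []
  let d := dxy_mapping action
  let nh := (snake.headI.1 + d.1, snake.headI.2 + d.2)
  if snake.contains nh || !(decide (0 < nh.1 ∧ nh.1 < 7 ∧ 0 < nh.2 ∧ nh.2 < 7)) then (false, 0)
  else bfsA [(nh :: PySem.List.slice snake none (some (-1)), 0)] 0

-- ===== PORT B =====
-- _longest: longest run of consecutive valid moves from configuration c, capped at budget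
def longestB (c : List (Int × Int)) : Nat → Nat
  | 0 => 0
  | b + 1 =>
    [1, 2, 3, 4].foldl (fun best a =>
      let d := dxy_mapping a
      let nh := (c.headI.1 + d.1, c.headI.2 + d.2)
      if c.contains nh || !(decide (0 < nh.1 ∧ nh.1 < 7 ∧ 0 < nh.2 ∧ nh.2 < 7)) then best
      else max best (1 + longestB (nh :: PySem.List.slice c none (some (-1))) b)) 0

def check_valid_move_alt (state_for_llm : List (String × List (Int × Int))) (action : Int) : Bool × Int :=
  let snake := ((PySem.Dict.mk state_for_llm).get? "snake").getD []
  let d := dxy_mapping action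
  let nh := (snake.headI.1 + d.1, snake.headI.2 + d.2)
  if snake.contains nh || !(decide (0 < nh.1 ∧ nh.1 < 7 ∧ 0 < nh.2 ∧ nh.2 < 7)) then (false, 0)
  else
    let L := longestB (nh :: PySem.List.slice snake none (some (-1))) 5
    if 5 ≤ L then (true, 0) else (false, (L : Int) + 1)

-- ===== PRECONDITION & SPEC =====
-- Pre_ excludes exactly the inputs where the Python A raises: a missing 'snake' key or an empty
-- snake (KeyError/IndexError) and an action outside 1..4 (KeyError on dxy_mapping).
def Pre_check_valid_move (state_for_llm : List (String × List (Int × Int))) (action : Int) : Prop :=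
  ((PySem.Dict.mk state_for_llm).get? "snake").getD [] ≠ [] ∧
  (action = 1 ∨ action = 2 ∨ action = 3 ∨ action = 4)
instance (state_for_llm : List (String × List (Int × Int))) (action : Int) : Decidable (Pre_check_valid_move state_for_llm action) := by unfold Pre_check_valid_move; infer_instance

def pvWitness_check_valid_move : (List (String × List (Int × Int))) × Int := ([("snake", [(3, 3), (3, 4)])], 1)

def Spec_check_valid_move (state_for_llm : List (String × List (Int × Int))) (action : Int) (out : Bool × Int) : Prop := out = check_valid_move_alt state_for_llm action
instance (state_for_llm : List (String × List (Int × Int))) (action : Int) (out : Bool × Int) : Decidable (Spec_check_valid_move state_for_llm action out) := by unfold Spec_check_valid_move; infer_instance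

-- ===== CLAIM (what is proved, stated in full; the proofs are below) =====
def Claim_equal_check_valid_move : Prop := ∀ (state_for_llm : List (String × List (Int × Int))) (action : Int), Dom_check_valid_move state_for_llm action → Pre_check_valid_move state_for_llm action → Spec_check_valid_move state_for_llm action (check_valid_move state_for_llm action)

-- ===== LEMMAS AND PROOFS =====

-- one move attempt: none = invalid, some = the successor configuration
def stepC (c : List (Int × Int)) (a : Int) : Option (List (Int × Int)) :=
  let d := dxy_mapping a
  let nh := (c.headI.1 + d.1, c.headI.2 + d.2)
  if c.contains nh || !(decide (0 < nh.1 ∧ nh.1 < 7 ∧ 0 < nh.2 ∧ nh.2 < 7)) then none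
  else some (nh :: PySem.List.slice c none (some (-1)))

def peakP (p : List (Int × Int) × Nat) : Nat := p.2 + longestB p.1 (5 - p.2)

def mx (q : List (List (Int × Int) × Nat)) : Nat := (q.map peakP).foldl max 0

theorem tryActsA_cons (c : List (Int × Int)) (s : Nat) (a : Int) (as : List Int) :
    tryActsA c s (a :: as) =
      match stepC c a with
      | none => tryActsA c s as
      | some ns =>
        if 5 ≤ s + 1 then none
        else (tryActsA c s as).map (fun rest => (ns, s + 1) :: rest) := by
  simp only [tryActsA, stepC]
  split <;> rfl

theorem tryActsA_of_lt (c : List (Int × Int)) (s : Nat) (hs : s + 1 < 5) :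
    ∀ acts : List Int,
      tryActsA c s acts = some ((acts.filterMap (stepC c)).map (fun k => (k, s + 1))) := by
  intro acts
  induction acts with
  | nil => simp [tryActsA]
  | cons a as ih =>
    rw [tryActsA_cons, List.filterMap_cons]
    cases h : stepC c a with
    | none => dsimp only; exact ih
    | some ns => dsimp only; rw [if_neg (by omega), ih]; simp

theorem tryActsA_of_ge (c : List (Int × Int)) (s : Nat) (hs : 5 ≤ s + 1) :
    ∀ acts : List Int,
      tryActsA c s acts = if (acts.filterMap (stepC c)).isEmpty then some [] else none := by
  intro acts
  induction acts with
  | nil => simp [tryActsA]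
  | cons a as ih =>
    rw [tryActsA_cons, List.filterMap_cons]
    cases h : stepC c a with
    | none => dsimp only; exact ih
    | some ns => dsimp only; rw [if_pos hs]; simp

theorem longestB_succ (c : List (Int × Int)) (b : Nat) :
    longestB c (b + 1) =
      (([1, 2, 3, 4] : List Int).filterMap (stepC c)).foldl (fun m k => max m (1 + longestB k b)) 0 := by
  have hf : ∀ (best : Nat) (a : Int),
      (let d := dxy_mapping a
       let nh := (c.headI.1 + d.1, c.headI.2 + d.2)
       if c.contains nh || !(decide (0 < nh.1 ∧ nh.1 < 7 ∧ 0 < nh.2 ∧ nh.2 < 7)) then best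
       else max best (1 + longestB (nh :: PySem.List.slice c none (some (-1))) b)) =
      match stepC c a with
      | none => best
      | some k => max best (1 + longestB k b) := by
    intro best a
    simp only [stepC]
    split <;> rfl
  have key : ∀ (acts : List Int) (m : Nat),
      acts.foldl (fun best a =>
        let d := dxy_mapping a
        let nh := (c.headI.1 + d.1, c.headI.2 + d.2)
        if c.contains nh || !(decide (0 < nh.1 ∧ nh.1 < 7 ∧ 0 < nh.2 ∧ nh.2 < 7)) then best
        else max best (1 + longestB (nh :: PySem.List.slice c none (some (-1))) b)) m =
      (acts.filterMap (stepC c)).foldl (fun m k => max m (1 + longestB k b)) m := by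
    intro acts
    induction acts with
    | nil => intro m; rfl
    | cons a as ih =>
      intro m
      rw [List.foldl_cons, List.filterMap_cons, hf m a]
      cases h : stepC c a with
      | none => dsimp only; exact ih m
      | some k => dsimp only; rw [List.foldl_cons]; exact ih _
  simpa [longestB] using key [1, 2, 3, 4] 0

theorem foldl_max_start (l : List Nat) (a : Nat) : l.foldl max a = max a (l.foldl max 0) := by
  induction l generalizing a with
  | nil => simp
  | cons x t ih =>
    simp only [List.foldl_cons]
    rw [ih (max a x), ih (max 0 x)]
    omega

theorem mx_cons (p : List (Int × Int) × Nat) (q : List (List (Int × Int) × Nat)) :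
    mx (p :: q) = max (peakP p) (mx q) := by
  simp only [mx, List.map_cons, List.foldl_cons]
  rw [foldl_max_start]; omega

theorem mx_append (q r : List (List (Int × Int) × Nat)) : mx (q ++ r) = max (mx q) (mx r) := by
  induction q with
  | nil => simp [mx]
  | cons p t ih => simp only [List.cons_append, mx_cons, ih]; omega

theorem le_mx_of_mem {p : List (Int × Int) × Nat} {q : List (List (Int × Int) × Nat)}
    (h : p ∈ q) : peakP p ≤ mx q := by
  induction q with
  | nil => simp at h
  | cons x t ih =>
    rw [mx_cons]
    rcases List.mem_cons.mp h with h | h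
    · subst h; omega
    · have := ih h; omega

theorem mx_le_iff (q : List (List (Int × Int) × Nat)) (k : Nat) :
    k ≤ mx q ↔ k = 0 ∨ ∃ p ∈ q, k ≤ peakP p := by
  induction q with
  | nil => simp [mx]
  | cons x t ih =>
    rw [mx_cons]
    constructor
    · intro h
      rcases Nat.eq_zero_or_pos k with rfl | hk
      · left; rfl
      · rcases Nat.le_total (peakP x) (mx t) with hle | hle
        · have : k ≤ mx t := by omega
          rcases (ih.mp this) with h0 | ⟨p, hp, hkp⟩
          · omega
          · exact Or.inr ⟨p, List.mem_cons_of_mem _ hp, hkp⟩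
        · exact Or.inr ⟨x, List.mem_cons_self, by omega⟩
    · intro h
      rcases h with rfl | ⟨p, hp, hkp⟩
      · omega
      · rcases List.mem_cons.mp hp with hp | hp
        · subst hp; omega
        · have := le_mx_of_mem hp; omega

-- peak recurrence: for s ≤ 3, the peak of (c,s) is s if c has no valid successor,
-- else the max peak of its successors at depth s+1
theorem peak_rec (c : List (Int × Int)) (s : Nat) (hs : s ≤ 3) :
    s + longestB c (5 - s) =
      if (([1, 2, 3, 4] : List Int).filterMap (stepC c)).isEmpty then s
      else mx ((([1, 2, 3, 4] : List Int).filterMap (stepC c)).map (fun k => (k, s + 1))) := by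
  have h5 : 5 - s = (4 - s) + 1 := by omega
  rw [h5, longestB_succ]
  set kids := ([1, 2, 3, 4] : List Int).filterMap (stepC c) with hk
  have key : ∀ (l : List (List (Int × Int))) (m : Nat),
      s + l.foldl (fun m k => max m (1 + longestB k (4 - s))) m =
      (l.map (fun k => (k, s + 1))).foldl (fun m p => max m (peakP p)) (s + m) := by
    intro l
    induction l with
    | nil => intro m; simp
    | cons x t ih =>
      intro m
      simp only [List.foldl_cons, List.map_cons]
      rw [ih]
      congr 1
      simp only [peakP]
      have : 5 - (s + 1) = 4 - s := by omega
      rw [this]; omega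
  have foldmax : ∀ (l : List (List (Int × Int) × Nat)) (m : Nat),
      l.foldl (fun m p => max m (peakP p)) m = (l.map peakP).foldl max m := by
    intro l; induction l with
    | nil => intro m; rfl
    | cons x t ih => intro m; simp only [List.foldl_cons, List.map_cons]; exact ih _
  split
  · rename_i he
    rw [List.isEmpty_iff] at he
    rw [he]; simp
  · rename_i he
    rw [List.isEmpty_iff] at he
    rw [key kids 0, foldmax]
    simp only [mx, Nat.add_zero]
    rw [foldl_max_start ((kids.map (fun k => (k, s + 1))).map peakP) s]
    have : ∃ p ∈ kids.map (fun k => (k, s + 1)), s ≤ peakP p := by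
      rcases List.exists_mem_of_ne_nil kids he with ⟨k, hk'⟩
      exact ⟨(k, s + 1), List.mem_map_of_mem hk', by simp only [peakP]; omega⟩
    rcases this with ⟨p, hp, hsp⟩
    have := le_mx_of_mem hp
    simp only [mx] at this
    omega

-- levelled queue: entries at depth s followed by entries at depth s+1, all depths ≤ 4
def Lv (q : List (List (Int × Int) × Nat)) : Prop :=
  ∃ (s : Nat) (A B : List (List (Int × Int))),
    q = A.map (fun c => (c, s)) ++ B.map (fun c => (c, s + 1)) ∧ s ≤ 4 ∧ (B ≠ [] → s + 1 ≤ 4)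

theorem Lv_cons {c : List (Int × Int)} {s : Nat} {rest : List (List (Int × Int) × Nat)}
    (h : Lv ((c, s) :: rest)) :
    s ≤ 4 ∧ ∃ (A B : List (List (Int × Int))),
      rest = A.map (fun c => (c, s)) ++ B.map (fun c => (c, s + 1)) ∧ (B ≠ [] → s + 1 ≤ 4) := by
  obtain ⟨s0, A, B, heq, h4, hB⟩ := h
  cases A with
  | cons a A' =>
    simp only [List.map_cons, List.cons_append, List.cons.injEq, Prod.mk.injEq] at heq
    obtain ⟨⟨rfl, rfl⟩, hrest⟩ := heq
    exact ⟨h4, A', B, hrest, hB⟩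
  | nil =>
    simp only [List.map_nil, List.nil_append] at heq
    cases B with
    | nil => simp at heq
    | cons b B' =>
      simp only [List.map_cons, List.cons.injEq, Prod.mk.injEq] at heq
      obtain ⟨⟨rfl, rfl⟩, hrest⟩ := heq
      refine ⟨hB (by simp), B', [], ?_, by simp⟩
      simp [hrest]

theorem Lv_steps {s : Nat} {rest : List (List (Int × Int) × Nat)}
    {A B : List (List (Int × Int))}
    (hrest : rest = A.map (fun c => (c, s)) ++ B.map (fun c => (c, s + 1))) :
    ∀ p ∈ rest, s ≤ p.2 := by
  intro p hp
  subst hrest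
  rcases List.mem_append.mp hp with h | h <;> rcases List.mem_map.mp h with ⟨x, _, rfl⟩ <;> simp

-- kids at depth 4 mean a fifth consecutive move exists
theorem le_foldl_acc (g : List (Int × Int) → Nat) :
    ∀ (t : List (List (Int × Int))) (acc : Nat), acc ≤ t.foldl (fun m k => max m (g k)) acc := by
  intro t
  induction t with
  | nil => intro acc; simp
  | cons x t ih =>
    intro acc
    rw [List.foldl_cons]
    exact le_trans (Nat.le_max_left _ _) (ih _)

theorem longestB_one_pos (c : List (Int × Int))
    (h : ¬ (([1, 2, 3, 4] : List Int).filterMap (stepC c)).isEmpty) : 1 ≤ longestB c 1 := by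
  rw [show (1 : Nat) = 0 + 1 from rfl, longestB_succ]
  rw [List.isEmpty_iff] at h
  rcases List.exists_mem_of_ne_nil _ h with ⟨k, hk⟩
  have key : ∀ (l : List (List (Int × Int))) (m : Nat), k ∈ l →
      1 ≤ l.foldl (fun m k => max m (1 + longestB k 0)) m := by
    intro l
    induction l with
    | nil => intro m h0; simp at h0
    | cons x t ih =>
      intro m hm
      rw [List.foldl_cons]
      rcases List.mem_cons.mp hm with rfl | hm'
      · exact le_trans (by omega) (le_foldl_acc _ t _)
      · exact ih _ hm'
  exact key _ 0 hk

theorem longestB_one_zero (c : List (Int × Int))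
    (h : (([1, 2, 3, 4] : List Int).filterMap (stepC c)).isEmpty) : longestB c 1 = 0 := by
  rw [show (1 : Nat) = 0 + 1 from rfl, longestB_succ]
  rw [List.isEmpty_iff] at h
  rw [h]
  rfl

-- master lemma: on a levelled queue, bfsA returns (true,0) iff some entry can be extended to
-- depth 5, else (false, last-popped depth + 1) where the last-popped depth is the max peak
theorem bfs_master : ∀ (q : List (List (Int × Int) × Nat)) (last : Nat), Lv q →
    bfsA q last = if ∃ p ∈ q, 5 ≤ peakP p then (true, 0)
                  else if q.isEmpty then (false, (last : Int) + 1) else (false, (mx q : Int) + 1) := by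
  intro q last
  induction q, last using bfsA.induct with
  | case1 last => intro _; simp [bfsA]
  | case2 last c s rest htry =>
    intro hlv
    obtain ⟨hs4, A, B, hrest, hB⟩ := Lv_cons hlv
    have hs : s = 4 := by
      by_contra hne
      have : s + 1 < 5 := by omega
      rw [tryActsA_of_lt c s this] at htry
      simp at htry
    subst hs
    have htry' := htry
    rw [tryActsA_of_ge c 4 (by omega)] at htry'
    have hkids : ¬ (([1, 2, 3, 4] : List Int).filterMap (stepC c)).isEmpty := by
      intro h; rw [if_pos h] at htry'; simp at htry'
    have hpeak : 5 ≤ peakP (c, 4) := by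
      have h1 := longestB_one_pos c hkids
      show 5 ≤ 4 + longestB c 1
      omega
    rw [bfsA]
    split
    · rw [if_pos ⟨(c, 4), List.mem_cons_self, hpeak⟩]
    · rename_i kids' heq
      rw [htry] at heq
      exact absurd heq (by simp)
  | case3 last c s rest kids htry ih =>
    intro hlv
    obtain ⟨hs4, A, B, hrest, hB⟩ := Lv_cons hlv
    have hsteps := Lv_steps hrest
    rw [bfsA]
    split
    · rename_i heq
      rw [htry] at heq
      exact absurd heq (by simp)
    rename_i kids' heq
    rw [htry] at heq
    injection heq with heq
    subst heq
    by_cases hc : s + 1 < 5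
    -- s ≤ 3: children are enqueued
    · have hs3 : s ≤ 3 := by omega
      rw [tryActsA_of_lt c s hc] at htry
      injection htry with htry
      subst htry
      have hlv' : Lv (rest ++ (([1, 2, 3, 4] : List Int).filterMap (stepC c)).map (fun k => (k, s + 1))) := by
        refine ⟨s, A, B ++ ([1, 2, 3, 4] : List Int).filterMap (stepC c), ?_, hs4, fun _ => by omega⟩
        rw [hrest, List.map_append, List.append_assoc]
      rw [ih hlv']
      have hpr := peak_rec c s hs3
      have hpeak_iff : 5 ≤ peakP (c, s) ↔
          ∃ p ∈ (([1, 2, 3, 4] : List Int).filterMap (stepC c)).map (fun k => (k, s + 1)), 5 ≤ peakP p := by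
        simp only [peakP]
        rw [hpr]
        split
        · rename_i he
          rw [List.isEmpty_iff] at he
          constructor
          · intro h; omega
          · intro ⟨p, hp, _⟩; rw [he] at hp; simp at hp
        · rw [mx_le_iff]
          constructor
          · intro h; rcases h with h | h; · omega
            · exact h
          · intro h; exact Or.inr h
      have hex_iff : (∃ p ∈ (c, s) :: rest, 5 ≤ peakP p) ↔
          (∃ p ∈ rest ++ (([1, 2, 3, 4] : List Int).filterMap (stepC c)).map (fun k => (k, s + 1)), 5 ≤ peakP p) := by
        simp only [List.mem_cons, List.mem_append]
        constructor
        · rintro ⟨p, hp | hp, h5⟩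
          · subst hp
            rcases hpeak_iff.mp h5 with ⟨p', hp', h5'⟩
            exact ⟨p', Or.inr hp', h5'⟩
          · exact ⟨p, Or.inl hp, h5⟩
        · rintro ⟨p, hp | hp, h5⟩
          · exact ⟨p, Or.inr hp, h5⟩
          · exact ⟨(c, s), Or.inl rfl, hpeak_iff.mpr ⟨p, hp, h5⟩⟩
      by_cases hex : ∃ p ∈ (c, s) :: rest, 5 ≤ peakP p
      · rw [if_pos hex, if_pos (hex_iff.mp hex)]
      · rw [if_neg hex, if_neg (fun h => hex (hex_iff.mpr h))]
        by_cases hemp : (rest ++ (([1, 2, 3, 4] : List Int).filterMap (stepC c)).map (fun k => (k, s + 1))).isEmpty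
        · rw [if_pos hemp]
          rw [List.isEmpty_iff, List.append_eq_nil_iff] at hemp
          obtain ⟨hr, hk⟩ := hemp
          have hkc : ([1, 2, 3, 4] : List Int).filterMap (stepC c) = [] := List.map_eq_nil_iff.mp hk
          have hpc : peakP (c, s) = s := by
            simp only [peakP]; rw [hpr, if_pos (by rw [hkc]; rfl)]
          simp only [hr, List.isEmpty_cons, if_neg Bool.false_ne_true]
          rw [mx_cons, mx]
          simp [hpc]
        · rw [if_neg hemp]
          simp only [List.isEmpty_cons, if_neg Bool.false_ne_true]
          congr 2
          rw [mx_cons, mx_append]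
          by_cases hkc : ([1, 2, 3, 4] : List Int).filterMap (stepC c) = []
          · have hm : (([1, 2, 3, 4] : List Int).filterMap (stepC c)).map (fun k => (k, s + 1)) = ([] : List (List (Int × Int) × Nat)) := by
              rw [hkc]; rfl
            have hpc : peakP (c, s) = s := by
              simp only [peakP]; rw [hpr, if_pos (by rw [hkc]; rfl)]
            have hrne : rest ≠ [] := by
              intro h
              rw [h, hm] at hemp; simp at hemp
            rcases List.exists_mem_of_ne_nil rest hrne with ⟨p, hp'⟩
            have h1 : s ≤ peakP p := le_trans (hsteps p hp') (by simp [peakP])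
            have h2 := le_mx_of_mem hp'
            rw [hm, hpc]
            rw [show mx ([] : List (List (Int × Int) × Nat)) = 0 from rfl]
            omega
          · have hpc : peakP (c, s) = mx ((([1, 2, 3, 4] : List Int).filterMap (stepC c)).map (fun k => (k, s + 1))) := by
              simp only [peakP]
              rw [hpr, if_neg (by rw [List.isEmpty_iff]; exact hkc)]
            rw [hpc]; omega
    -- s = 4: some [] (no child survives a fifth step, else tryActsA returns none)
    · rw [tryActsA_of_ge c s (by omega)] at htry
      have hkc : (([1, 2, 3, 4] : List Int).filterMap (stepC c)).isEmpty := by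
        by_contra h
        rw [if_neg h] at htry; simp at htry
      rw [if_pos hkc] at htry
      injection htry with htry
      subst htry
      have hs : s = 4 := by omega
      have hB0 : B = [] := by
        by_contra h
        have := hB h; omega
      have hlv' : Lv (rest ++ []) := by
        rw [List.append_nil]
        exact ⟨s, A, [], by simp [hrest, hB0, hs], hs4, by simp⟩
      rw [ih hlv']
      have hpc : peakP (c, s) = s := by
        simp only [peakP]
        rw [hs] at *
        rw [show (5 : Nat) - 4 = 1 from rfl, longestB_one_zero c hkc]
      have hex_iff : (∃ p ∈ (c, s) :: rest, 5 ≤ peakP p) ↔ (∃ p ∈ rest ++ [], 5 ≤ peakP p) := by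
        rw [List.append_nil]
        simp only [List.mem_cons]
        constructor
        · rintro ⟨p, hp | hp, h5⟩
          · subst hp; rw [hpc] at h5; omega
          · exact ⟨p, hp, h5⟩
        · rintro ⟨p, hp, h5⟩; exact ⟨p, Or.inr hp, h5⟩
      by_cases hex : ∃ p ∈ (c, s) :: rest, 5 ≤ peakP p
      · rw [if_pos hex, if_pos (hex_iff.mp hex)]
      · rw [if_neg hex, if_neg (fun h => hex (hex_iff.mpr h))]
        rw [List.append_nil]
        by_cases hrne : rest = []
        · subst hrne
          simp only [List.isEmpty_nil, List.isEmpty_cons,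
            if_neg Bool.false_ne_true]
          rw [mx_cons]
          rw [show mx ([] : List (List (Int × Int) × Nat)) = 0 from rfl]
          rw [hpc, hs]
          simp
        · rw [if_neg (by simpa [List.isEmpty_iff] using hrne)]
          simp only [List.isEmpty_cons, if_neg Bool.false_ne_true]
          congr 2
          rw [mx_cons]
          rcases List.exists_mem_of_ne_nil rest hrne with ⟨p, hp'⟩
          have h1 : s ≤ peakP p := le_trans (hsteps p hp') (by simp [peakP])
          have h2 := le_mx_of_mem hp'
          rw [hpc]
          omega

-- ===== VERDICT (by name: the statement is the Claim_ definition above) =====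
theorem check_valid_move_spec : Claim_equal_check_valid_move := by
  intro state_for_llm action _ _
  unfold Spec_check_valid_move check_valid_move check_valid_move_alt
  set snake := ((PySem.Dict.mk state_for_llm).get? "snake").getD [] with hsn
  set d := dxy_mapping action with hd
  set nh := (snake.headI.1 + d.1, snake.headI.2 + d.2) with hnh
  by_cases hg : (snake.contains nh || !(decide (0 < nh.1 ∧ nh.1 < 7 ∧ 0 < nh.2 ∧ nh.2 < 7))) = true
  · rw [if_pos hg, if_pos hg]
  · rw [if_neg hg, if_neg hg]
    set c0 := nh :: PySem.List.slice snake none (some (-1)) with hc0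
    have hlv : Lv [(c0, 0)] := ⟨0, [c0], [], by simp, by omega, by simp⟩
    rw [bfs_master [(c0, 0)] 0 hlv]
    have hpk : peakP (c0, 0) = longestB c0 5 := by simp [peakP]
    by_cases h5 : 5 ≤ longestB c0 5
    · rw [if_pos ⟨(c0, 0), List.mem_cons_self, by rw [hpk]; exact h5⟩, if_pos h5]
    · rw [if_neg ?_, if_neg h5]
      · simp only [List.isEmpty_cons, if_neg Bool.false_ne_true]
        rw [mx_cons, mx]
        simp [hpk]
      · rintro ⟨p, hp, hple⟩
        simp only [List.mem_cons, List.not_mem_nil, or_false] at hp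
        subst hp
        rw [hpk] at hple
        exact h5 hple
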